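-- pv_equiv track=rewrite | github.com/IhToN/DAW1-PRG | Ejercicios/Ejercicio43.py | dic_divisores
-- ===== SOURCE A (Python) =====
-- from math import ceil
--
-- def divisores(numero):
--     """ Devuelve una tupla con los divisores de numero
--     """
--     ret = ()
--     for i in range(1, ceil((numero + 1) / 2)):
--         if numero % i == 0:
--             ret += i,
--     ret += numero,
--     return ret
--
-- def dic_divisores(start, stop):
--     """ Devuelve un diccionario cuya clave es un número
--     y el valor es una tupla con los divisores de dicho número
--     sin incluir el 1 ni él mismo en el rango especificado
--     """
--     ret = dict()
--     if start < 2: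
--         start = 2
--     for num in range(start, stop + 1):
--         temp_div = divisores(num)
--         ret[num] = temp_div[1:len(temp_div) - 1]
--     return ret
-- ===== SOURCE B (Python) =====
-- def dic_divisores(start, stop):
--     """Divisor sieve: each candidate divisor d marks all of its in-range multiples,
--     instead of trial-dividing every number separately."""
--     lo = start if start >= 2 else 2
--     if stop < lo:
--         return {}
--     divs = {n: [] for n in range(lo, stop + 1)}
--     for d in range(2, stop // 2 + 1):
--         for q in range(2, stop // d + 1):
--             m = d * q
--             if m >= lo:
--                 divs[m].append(d)
--     return {n: tuple(v) for n, v in divs.items()}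
-- ===== Notes on version B (the rewrite author's own statement) =====
-- stated objective: alternative
-- what changed: Replaces per-number trial division (scan 1..n/2 for every n in the range) by a divisor sieve: each candidate divisor d walks once over its multiples d*q <= stop and appends itself to their lists.
import Mathlib
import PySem

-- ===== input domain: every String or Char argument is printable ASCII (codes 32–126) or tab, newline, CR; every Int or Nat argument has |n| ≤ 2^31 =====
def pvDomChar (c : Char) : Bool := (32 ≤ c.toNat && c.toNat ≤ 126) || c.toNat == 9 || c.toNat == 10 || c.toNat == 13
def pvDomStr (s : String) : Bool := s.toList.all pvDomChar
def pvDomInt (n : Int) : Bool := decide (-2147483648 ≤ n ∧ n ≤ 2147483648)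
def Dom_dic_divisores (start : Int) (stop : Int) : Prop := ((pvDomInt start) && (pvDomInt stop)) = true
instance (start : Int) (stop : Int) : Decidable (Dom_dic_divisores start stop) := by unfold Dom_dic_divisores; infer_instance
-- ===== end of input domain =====

-- B replaces A's per-number trial division by a divisor sieve (each divisor marks its multiples).

-- ===== PORT A =====
-- helper `divisores`; Python's ceil((numero+1)/2) is float-exact for |numero| ≤ 2^31 and equals (numero+2)//2
def pvDivisores (numero : Int) : List Int :=
  let ret : List Int :=
    (PySem.List.pyRange 1 (PySem.Int.floordiv (numero + 2) 2) 1).foldl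
      (fun acc i => if PySem.Int.mod numero i == 0 then acc ++ [i] else acc) []
  ret ++ [numero]
-- helper `divisores`; Python's ceil((numero+1)/2) is float-exact for |numero| ≤ 2^31 and equals (numero+2)//2

def dic_divisores (start : Int) (stop : Int) : List (Int × List Int) :=
  let start' := if start < 2 then 2 else start
  let ret : PySem.Dict Int (List Int) :=
    (PySem.List.pyRange start' (stop + 1) 1).foldl
      (fun d num =>
        let tdiv := pvDivisores num
        d.insert num (PySem.List.slice tdiv (some 1) (some ((tdiv.length : Int) - 1))))
      PySem.Dict.empty
  ret.items

-- ===== PORT B =====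
def dic_divisores_alt (start : Int) (stop : Int) : List (Int × List Int) :=
  let lo := if start < 2 then 2 else start
  if stop < lo then [] else
  let divs0 : PySem.Dict Int (List Int) :=
    (PySem.List.pyRange lo (stop + 1) 1).foldl (fun d n => d.insert n []) PySem.Dict.empty
  let divs :=
    (PySem.List.pyRange 2 (PySem.Int.floordiv stop 2 + 1) 1).foldl
      (fun d1 dd =>
        (PySem.List.pyRange 2 (PySem.Int.floordiv stop dd + 1) 1).foldl
          (fun d2 q => if lo ≤ dd * q then d2.modify (dd * q) [] (· ++ [dd]) else d2) d1)
      divs0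
  let ret : PySem.Dict Int (List Int) :=
    divs.items.foldl (fun d p => d.insert p.1 p.2) PySem.Dict.empty
  ret.items


-- ===== PRECONDITION & SPEC =====
def Spec_dic_divisores (start : Int) (stop : Int) (out : List (Int × List Int)) : Prop := out = dic_divisores_alt start stop
instance (start : Int) (stop : Int) (out : List (Int × List Int)) : Decidable (Spec_dic_divisores start stop out) := by unfold Spec_dic_divisores; infer_instance

-- ===== CLAIM (what is proved, stated in full; the proofs are below) =====
def Claim_equal_dic_divisores : Prop := ∀ (start : Int) (stop : Int), Dom_dic_divisores start stop → Spec_dic_divisores start stop (dic_divisores start stop)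

-- ===== LEMMAS AND PROOFS =====
-- pvVal n: the shared canonical form of both values at key n — the increasing list of divisors d of n with 2 ≤ d ≤ n//2
def pvVal (n : Int) : List Int :=
  (PySem.List.pyRange 2 (PySem.Int.floordiv n 2 + 1) 1).filter (fun d => PySem.Int.mod n d == 0)

lemma pvInner_getD (lo dd n : Int) (qs : List Int) (d0 : PySem.Dict Int (List Int)) :
    (qs.foldl (fun d2 q => if lo ≤ dd * q then d2.modify (dd * q) [] (· ++ [dd]) else d2) d0).getD n []
      = d0.getD n [] ++ (qs.filter (fun q => decide (lo ≤ dd * q) && decide (dd * q = n))).map (fun _ => dd) := by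
  induction qs generalizing d0 with
  | nil => simp
  | cons q qs ih =>
    simp only [List.foldl_cons, List.filter_cons]
    by_cases hle : lo ≤ dd * q
    · rw [if_pos hle, ih, PySem.Dict.getD_modify]
      by_cases heq : dd * q = n
      · rw [if_pos heq.symm]
        have hln : lo ≤ n := heq ▸ hle
        simp [heq, hln]
      · rw [if_neg (fun h => heq h.symm)]
        simp [heq, hle]
    · rw [if_neg hle]
      simp only [hle, decide_false, Bool.false_and, if_neg (by simp : ¬ (false = true))]
      exact ih d0

lemma pvInner_keys (lo dd : Int) (qs : List Int) (d0 : PySem.Dict Int (List Int))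
    (h : ∀ q ∈ qs, lo ≤ dd * q → dd * q ∈ d0.keys) :
    (qs.foldl (fun d2 q => if lo ≤ dd * q then d2.modify (dd * q) [] (· ++ [dd]) else d2) d0).keys
      = d0.keys := by
  induction qs generalizing d0 with
  | nil => rfl
  | cons q qs ih =>
    simp only [List.foldl_cons]
    by_cases hle : lo ≤ dd * q
    · rw [if_pos hle]
      have hk : (d0.modify (dd * q) [] (· ++ [dd])).keys = d0.keys := by
        rw [PySem.Dict.keys_modify, PySem.Dict.keys_insert_of_contains]
        exact (PySem.Dict.contains_iff_mem_keys _ _).2 (h q (by simp) hle)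
      rw [ih _ (fun q' hq' hle' => by rw [hk]; exact h q' (by simp [hq']) hle'), hk]
    · rw [if_neg hle]
      exact ih d0 (fun q' hq' hle' => h q' (by simp [hq']) hle')

lemma pvOuter_getD (lo stop n : Int) (ds : List Int) (d0 : PySem.Dict Int (List Int)) :
    (ds.foldl (fun d1 dd =>
        (PySem.List.pyRange 2 (PySem.Int.floordiv stop dd + 1) 1).foldl
          (fun d2 q => if lo ≤ dd * q then d2.modify (dd * q) [] (· ++ [dd]) else d2) d1) d0).getD n []
      = d0.getD n [] ++ ds.flatMap (fun dd =>
          ((PySem.List.pyRange 2 (PySem.Int.floordiv stop dd + 1) 1).filter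
            (fun q => decide (lo ≤ dd * q) && decide (dd * q = n))).map (fun _ => dd)) := by
  induction ds generalizing d0 with
  | nil => simp
  | cons dd ds ih =>
    simp only [List.foldl_cons, List.flatMap_cons]
    rw [ih, pvInner_getD, List.append_assoc]

lemma pvOuter_keys (lo stop : Int) (ds : List Int) (d0 : PySem.Dict Int (List Int))
    (h : ∀ dd ∈ ds, ∀ q ∈ PySem.List.pyRange 2 (PySem.Int.floordiv stop dd + 1) 1,
          lo ≤ dd * q → dd * q ∈ d0.keys) :
    (ds.foldl (fun d1 dd =>
        (PySem.List.pyRange 2 (PySem.Int.floordiv stop dd + 1) 1).foldl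
          (fun d2 q => if lo ≤ dd * q then d2.modify (dd * q) [] (· ++ [dd]) else d2) d1) d0).keys
      = d0.keys := by
  induction ds generalizing d0 with
  | nil => rfl
  | cons dd ds ih =>
    simp only [List.foldl_cons]
    have hk := pvInner_keys lo dd _ d0 (h dd (by simp))
    rw [ih _ (fun dd' hd' q hq hle => by rw [hk]; exact h dd' (by simp [hd']) q hq hle), hk]

lemma pvFilter_single (lo stop n dd : Int) (h2 : 2 ≤ dd) (hns : n ≤ stop) (hlon : lo ≤ n) :
    ((PySem.List.pyRange 2 (PySem.Int.floordiv stop dd + 1) 1).filter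
        (fun q => decide (lo ≤ dd * q) && decide (dd * q = n))).map (fun _ => dd)
      = if dd ∣ n ∧ dd * 2 ≤ n then [dd] else [] := by
  have hdpos : (0:Int) < dd := by omega
  by_cases hdvd : dd ∣ n
  · obtain ⟨q0, hq0⟩ := hdvd
    have hfc : (PySem.List.pyRange 2 (PySem.Int.floordiv stop dd + 1) 1).filter
          (fun q => decide (lo ≤ dd * q) && decide (dd * q = n))
        = (PySem.List.pyRange 2 (PySem.Int.floordiv stop dd + 1) 1).filter (fun q => q == q0) := by
      apply List.filter_congr
      intro x _
      by_cases hx : x = q0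
      · subst hx
        simp [← hq0, hlon]
      · have hne : ¬ dd * x = n := fun h => hx (mul_left_cancel₀ (by omega) (h.trans hq0))
        simp [hne, hx]
    rw [hfc, List.filter_beq]
    by_cases hmem : q0 ∈ PySem.List.pyRange 2 (PySem.Int.floordiv stop dd + 1) 1
    · rw [List.count_eq_one_of_mem (PySem.List.nodup_pyRange_one _ _) hmem]
      have h2q : 2 ≤ q0 := (PySem.List.mem_pyRange_one.1 hmem).1
      rw [if_pos ⟨⟨q0, hq0⟩, by nlinarith⟩]
      simp
    · rw [List.count_eq_zero_of_not_mem hmem]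
      rw [if_neg]
      · simp
      · rintro ⟨-, hle⟩
        apply hmem
        rw [PySem.List.mem_pyRange_one]
        constructor
        · nlinarith
        · have : q0 ≤ PySem.Int.floordiv stop dd := (PySem.Int.le_floordiv_iff_mul_le hdpos).2 (by nlinarith)
          omega
  · rw [if_neg (fun h => hdvd h.1)]
    rw [List.filter_eq_nil_iff.2]
    · simp
    · intro a _ h
      simp only [Bool.and_eq_true, decide_eq_true_eq] at h
      exact hdvd ⟨a, h.2.symm⟩

lemma pvFlatMap_congr {α β : Type} (l : List α) (f g : α → List β) (h : ∀ x ∈ l, f x = g x) :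
    l.flatMap f = l.flatMap g := by
  induction l with
  | nil => rfl
  | cons x l ih =>
    simp only [List.flatMap_cons, h x (by simp), ih (fun y hy => h y (by simp [hy]))]

lemma pvFlatMap_filter (l : List Int) (p : Int → Prop) [DecidablePred p] (f : Int → Bool)
    (h : ∀ x ∈ l, p x ↔ f x = true) :
    l.flatMap (fun x => if p x then [x] else []) = l.filter f := by
  induction l with
  | nil => rfl
  | cons x l ih =>
    simp only [List.flatMap_cons, List.filter_cons]
    by_cases hx : p x
    · rw [if_pos hx, if_pos ((h x (by simp)).1 hx)]
      simp [ih (fun y hy => h y (by simp [hy]))]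
    · rw [if_neg hx, if_neg (fun hf => hx ((h x (by simp)).2 hf))]
      simp [ih (fun y hy => h y (by simp [hy]))]

lemma pvBval (lo stop n : Int) (hlo : 2 ≤ lo) (hn : lo ≤ n) (hs : n ≤ stop) :
    (PySem.List.pyRange 2 (PySem.Int.floordiv stop 2 + 1) 1).flatMap (fun dd =>
        ((PySem.List.pyRange 2 (PySem.Int.floordiv stop dd + 1) 1).filter
          (fun q => decide (lo ≤ dd * q) && decide (dd * q = n))).map (fun _ => dd))
      = pvVal n := by
  have h2 : (0:Int) < 2 := by norm_num
  have hn2 : 2 ≤ n := by omega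
  have hm1 : 1 ≤ PySem.Int.floordiv n 2 := (PySem.Int.le_floordiv_iff_mul_le h2).2 (by omega)
  have hmono : PySem.Int.floordiv n 2 + 1 ≤ PySem.Int.floordiv stop 2 + 1 := by
    rw [PySem.Int.floordiv_eq_ediv_of_pos h2, PySem.Int.floordiv_eq_ediv_of_pos h2]
    have := Int.ediv_le_ediv h2 hs
    omega
  rw [pvFlatMap_congr _ _ (fun dd => if dd ∣ n ∧ dd * 2 ≤ n then [dd] else [])
      (fun dd hdd => pvFilter_single lo stop n dd (PySem.List.mem_pyRange_one.1 hdd).1 hs hn)]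
  rw [show PySem.List.pyRange 2 (PySem.Int.floordiv stop 2 + 1) 1
        = PySem.List.pyRange 2 (PySem.Int.floordiv n 2 + 1) 1
          ++ PySem.List.pyRange (PySem.Int.floordiv n 2 + 1) (PySem.Int.floordiv stop 2 + 1) 1
      from PySem.List.pyRange_one_append _ _ _ (by omega) hmono]
  rw [List.flatMap_append]
  have hnil : (PySem.List.pyRange (PySem.Int.floordiv n 2 + 1) (PySem.Int.floordiv stop 2 + 1) 1).flatMap
      (fun dd => if dd ∣ n ∧ dd * 2 ≤ n then [dd] else []) = [] :=
    List.flatMap_eq_nil_iff.2 (fun dd hdd => by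
      have h1 := (PySem.List.mem_pyRange_one.1 hdd).1
      have : n < dd * 2 := (PySem.Int.floordiv_lt_iff_lt_mul h2).1 (by omega)
      rw [if_neg (fun hc => by omega)])
  rw [hnil, List.append_nil]
  unfold pvVal
  rw [pvFlatMap_congr _ _ (fun dd => if dd ∣ n then [dd] else []) (fun dd hdd => by
    have hub := (PySem.List.mem_pyRange_one.1 hdd).2
    have hle : dd * 2 ≤ n := (PySem.Int.le_floordiv_iff_mul_le h2).1 (by omega)
    by_cases hdv : dd ∣ n
    · simp [hdv, hle]
    · simp [hdv])]
  exact pvFlatMap_filter _ _ _ (fun x _ => by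
    rw [beq_iff_eq, PySem.Int.mod_eq_zero_iff_dvd])


lemma pvAval (n : Int) (hn : 2 ≤ n) :
    PySem.List.slice (pvDivisores n) (some 1) (some (((pvDivisores n).length : Int) - 1))
      = pvVal n := by
  have h2 : (0:Int) < 2 := by norm_num
  have hc : PySem.Int.floordiv (n + 2) 2 = PySem.Int.floordiv n 2 + 1 := by
    rw [PySem.Int.floordiv_eq_ediv_of_pos h2, PySem.Int.floordiv_eq_ediv_of_pos h2]; omega
  have hm1 : 1 ≤ PySem.Int.floordiv n 2 := (PySem.Int.le_floordiv_iff_mul_le h2).2 (by omega)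
  have hdiv : pvDivisores n = 1 :: (pvVal n ++ [n]) := by
    unfold pvDivisores
    rw [PySem.List.foldl_append_if (fun i => PySem.Int.mod n i == 0) (fun i => i)]
    rw [hc, PySem.List.pyRange_one_cons (by omega : (1:Int) < PySem.Int.floordiv n 2 + 1)]
    rw [List.filter_cons]
    simp [pvVal]
  rw [hdiv]
  have hlen : ((1 :: (pvVal n ++ [n])).length : Int) - 1 = (((pvVal n).length + 1 : Nat) : Int) := by
    have h : (1 :: (pvVal n ++ [n])).length = (pvVal n).length + 2 := by simp
    rw [h]
    push_cast
    ring
  rw [hlen, show (1:Int) = ((1:Nat):Int) from rfl, PySem.List.slice_natCast]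
  simp
theorem pvMain (start stop : Int) : dic_divisores start stop = dic_divisores_alt start stop := by
  unfold dic_divisores dic_divisores_alt
  dsimp only
  set lo := if start < 2 then 2 else start with hlodef
  have hlo2 : 2 ≤ lo := by rw [hlodef]; split <;> omega
  by_cases hempty : stop < lo
  · rw [if_pos hempty, PySem.List.pyRange_one_eq_nil (by omega : stop + 1 ≤ lo)]
    rfl
  rw [if_neg hempty]
  set l := PySem.List.pyRange lo (stop + 1) 1 with hldef
  have hmeml : ∀ n ∈ l, lo ≤ n ∧ n < stop + 1 := fun n hn => PySem.List.mem_pyRange_one.1 hn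
  have hnodupl : l.Nodup := PySem.List.nodup_pyRange_one _ _
  have hemp : (PySem.Dict.empty : PySem.Dict Int (List Int)).items = [] := rfl
  have hA : (l.foldl (fun d num => d.insert num
        (PySem.List.slice (pvDivisores num) (some 1) (some (((pvDivisores num).length : Int) - 1))))
        (PySem.Dict.empty : PySem.Dict Int (List Int))).items
      = l.map (fun num => (num, PySem.List.slice (pvDivisores num) (some 1)
          (some (((pvDivisores num).length : Int) - 1)))) := by
    rw [PySem.Dict.items_foldl_insert_fresh l (fun a => a)
        (fun num => PySem.List.slice (pvDivisores num) (some 1) (some (((pvDivisores num).length : Int) - 1)))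
        PySem.Dict.empty (fun a _ => PySem.Dict.contains_empty a) (by simpa using hnodupl)]
    simp [hemp]
  have hitems0 : (l.foldl (fun d n => d.insert n ([] : List Int)) PySem.Dict.empty).items
      = l.map (fun n => (n, ([] : List Int))) := by
    rw [PySem.Dict.items_foldl_insert_fresh l (fun a => a) (fun _ => ([] : List Int))
        PySem.Dict.empty (fun a _ => PySem.Dict.contains_empty a) (by simpa using hnodupl)]
    simp [hemp]
  set divs0 := l.foldl (fun d n => d.insert n ([] : List Int)) PySem.Dict.empty with hdivs0
  have hkeys0 : divs0.keys = l := by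
    simp only [PySem.Dict.keys, hitems0, List.map_map]
    simp [Function.comp_def]
  set ds := PySem.List.pyRange 2 (PySem.Int.floordiv stop 2 + 1) 1 with hds
  have hkeyhyp : ∀ dd ∈ ds, ∀ q ∈ PySem.List.pyRange 2 (PySem.Int.floordiv stop dd + 1) 1,
      lo ≤ dd * q → dd * q ∈ divs0.keys := by
    intro dd hdd q hq hle
    have h2d : 2 ≤ dd := (PySem.List.mem_pyRange_one.1 hdd).1
    have hqu := (PySem.List.mem_pyRange_one.1 hq).2
    have hqs : q * dd ≤ stop := (PySem.Int.le_floordiv_iff_mul_le (by omega)).1 (by omega)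
    rw [hkeys0, hldef, PySem.List.mem_pyRange_one]
    exact ⟨hle, by nlinarith⟩
  set divs := ds.foldl (fun d1 dd =>
      (PySem.List.pyRange 2 (PySem.Int.floordiv stop dd + 1) 1).foldl
        (fun d2 q => if lo ≤ dd * q then d2.modify (dd * q) [] (· ++ [dd]) else d2) d1) divs0 with hdivs
  have hkeys : divs.keys = l := by
    rw [hdivs, pvOuter_keys lo stop ds divs0 hkeyhyp, hkeys0]
  have hgetD : ∀ n ∈ l, divs.getD n [] = pvVal n := by
    intro n hnl
    have h0 : divs0.getD n [] = [] :=
      PySem.Dict.getD_of_mem_items divs0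
        (by rw [hitems0]; exact List.mem_map_of_mem hnl)
        (by rw [hkeys0]; exact hnodupl) []
    rw [hdivs, pvOuter_getD, h0, List.nil_append]
    exact pvBval lo stop n hlo2 (hmeml n hnl).1 (by have := (hmeml n hnl).2; omega)
  have hitems : divs.items = l.map (fun n => (n, pvVal n)) := by
    rw [PySem.Dict.items_eq_map_keys divs (by rw [hkeys]; exact hnodupl) [], hkeys]
    exact List.map_congr_left (fun n hnl => by rw [hgetD n hnl])
  have hret : (divs.items.foldl (fun d p => d.insert p.1 p.2) PySem.Dict.empty).items = divs.items := by
    rw [PySem.Dict.items_foldl_insert_fresh divs.items (fun p => p.1) (fun p => p.2)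
        PySem.Dict.empty (fun a _ => PySem.Dict.contains_empty _)
        (by rw [show divs.items.map (fun p => p.1) = divs.keys from rfl, hkeys]; exact hnodupl)]
    simp [hemp]
  rw [hA, hret, hitems]
  exact List.map_congr_left (fun n hnl => by
    have hn2 : 2 ≤ n := le_trans hlo2 (hmeml n hnl).1
    rw [pvAval n hn2])

-- ===== VERDICT (by name: the statement is the Claim_ definition above) =====
theorem dic_divisores_spec : Claim_equal_dic_divisores := by
  intro start stop _
  unfold Spec_dic_divisores
  exact pvMain start stop
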